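-- pv_equiv track=rewrite | github.com/artachobruno/Athlete-Space---Backend | scripts/backfill_activity_titles.py | _is_generic_strava_title
-- ===== SOURCE A (Python) =====
-- def _is_generic_strava_title(title: str | None) -> bool:
--     """Check if title is a generic Strava-style auto-generated title.
--
--     Args:
--         title: Title to check
--
--     Returns:
--         True if title is generic/auto-generated
--     """
--     if not title:
--         return True
--
--     title_lower = title.lower().strip()
--
--     # Time-of-day prefixes used by Strava
--     time_prefixes = ["morning", "lunch", "afternoon", "evening", "night"]
--
--     # Activity types used by Strava
--     activity_types = [
--         "run", "ride", "swim", "walk", "hike", "workout",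
--         "weight training", "yoga", "crossfit", "elliptical",
--         "stair stepper", "rowing", "ski", "snowboard",
--         "ice skate", "kayak", "surf", "windsurf", "kitesurf",
--     ]
--
--     # Check for "Time Activity" pattern (e.g., "Morning Run", "Lunch Swim")
--     for prefix in time_prefixes:
--         for activity in activity_types:
--             if title_lower == f"{prefix} {activity}":
--                 return True
--
--     # Also catch simple generic titles
--     generic_exact = {
--         "run", "running", "ride", "cycling", "swim", "swimming",
--         "activity", "workout", "exercise", "training",
--     }
--     return title_lower in generic_exact
-- ===== SOURCE B (Python) =====
-- GENERIC_EXACT = {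
--     "run", "running", "ride", "cycling", "swim", "swimming",
--     "activity", "workout", "exercise", "training",
-- }
--
-- TIME_PREFIXES = {"morning", "lunch", "afternoon", "evening", "night"}
--
-- ACTIVITY_TYPES = {
--     "run", "ride", "swim", "walk", "hike", "workout",
--     "weight training", "yoga", "crossfit", "elliptical",
--     "stair stepper", "rowing", "ski", "snowboard",
--     "ice skate", "kayak", "surf", "windsurf", "kitesurf",
-- }
--
--
-- def _is_generic_strava_title(title):
--     """Check if title is a generic Strava-style auto-generated title."""
--     if not title:
--         return True
--     t = title.lower().strip()
--     if t in GENERIC_EXACT: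
--         return True
--     prefix, sep, rest = t.partition(" ")
--     return sep == " " and prefix in TIME_PREFIXES and rest in ACTIVITY_TYPES
-- ===== Notes on version B (the rewrite author's own statement) =====
-- stated objective: idiomatic
-- what changed: Replaced the 5x19 nested loop comparing the title against every concatenated 'prefix activity' string with a single partition at the first space followed by three set-membership tests.
import Mathlib
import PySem

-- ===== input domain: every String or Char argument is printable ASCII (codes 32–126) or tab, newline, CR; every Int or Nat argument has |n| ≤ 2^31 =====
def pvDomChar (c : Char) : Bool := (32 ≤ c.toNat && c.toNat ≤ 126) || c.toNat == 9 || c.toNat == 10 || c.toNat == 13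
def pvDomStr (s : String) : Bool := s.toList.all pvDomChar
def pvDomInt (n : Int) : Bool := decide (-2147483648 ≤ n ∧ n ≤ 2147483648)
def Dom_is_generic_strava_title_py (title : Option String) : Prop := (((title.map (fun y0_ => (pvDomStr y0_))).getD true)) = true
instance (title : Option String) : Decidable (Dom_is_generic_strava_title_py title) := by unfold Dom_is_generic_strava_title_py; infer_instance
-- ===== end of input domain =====

set_option maxRecDepth 4096


-- B replaces A's 5×19 nested loop over concatenated "prefix activity" strings by one
-- partition at the first space followed by set-membership tests (idiomatic; same cost class).

-- ===== PORT A =====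
def aTimePrefixes : List (List Char) :=
  ["morning".toList, "lunch".toList, "afternoon".toList, "evening".toList, "night".toList]

def aActivityTypes : List (List Char) :=
  ["run".toList, "ride".toList, "swim".toList, "walk".toList, "hike".toList, "workout".toList,
   "weight training".toList, "yoga".toList, "crossfit".toList, "elliptical".toList,
   "stair stepper".toList, "rowing".toList, "ski".toList, "snowboard".toList,
   "ice skate".toList, "kayak".toList, "surf".toList, "windsurf".toList, "kitesurf".toList]

def aGenericExact : PySem.Set (List Char) :=
  PySem.Set.ofList
    ["run".toList, "running".toList, "ride".toList, "cycling".toList, "swim".toList,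
     "swimming".toList, "activity".toList, "workout".toList, "exercise".toList, "training".toList]

def is_generic_strava_title_py (title : Option String) : Bool :=
  match title with
  | none => true
  | some s =>
    if s = "" then true
    else
      -- title.lower().strip(), handled on the List Char side via the PySem bridge
      let t := (PySem.Str.strip (PySem.Str.lower s)).toList
      -- nested for-loops: title_lower == f"{prefix} {activity}"
      if aTimePrefixes.any (fun p => aActivityTypes.any (fun a => t == p ++ ' ' :: a)) then true
      else PySem.Set.contains aGenericExact t

-- ===== PORT B =====
def bGenericExact : PySem.Set (List Char) :=
  PySem.Set.ofList
    ["run".toList, "running".toList, "ride".toList, "cycling".toList, "swim".toList,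
     "swimming".toList, "activity".toList, "workout".toList, "exercise".toList, "training".toList]

def bTimePrefixes : PySem.Set (List Char) :=
  PySem.Set.ofList
    ["morning".toList, "lunch".toList, "afternoon".toList, "evening".toList, "night".toList]

def bActivityTypes : PySem.Set (List Char) :=
  PySem.Set.ofList
    ["run".toList, "ride".toList, "swim".toList, "walk".toList, "hike".toList, "workout".toList,
     "weight training".toList, "yoga".toList, "crossfit".toList, "elliptical".toList,
     "stair stepper".toList, "rowing".toList, "ski".toList, "snowboard".toList,
     "ice skate".toList, "kayak".toList, "surf".toList, "windsurf".toList, "kitesurf".toList]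

def is_generic_strava_title_py_alt (title : Option String) : Bool :=
  match title with
  | none => true
  | some s =>
    if s = "" then true
    else
      let t := (PySem.Str.strip (PySem.Str.lower s)).toList
      if PySem.Set.contains bGenericExact t then true
      else
        -- t.partition(" "): prefix = chars before the first space, rest = chars after it
        let pre := t.takeWhile (fun c => c != ' ')
        match t.dropWhile (fun c => c != ' ') with
        | ' ' :: rest => PySem.Set.contains bTimePrefixes pre && PySem.Set.contains bActivityTypes rest
        | _ => false

-- ===== PRECONDITION & SPEC =====
def Spec_is_generic_strava_title_py (title : Option String) (out : Bool) : Prop := out = is_generic_strava_title_py_alt title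
instance (title : Option String) (out : Bool) : Decidable (Spec_is_generic_strava_title_py title out) := by unfold Spec_is_generic_strava_title_py; infer_instance

-- ===== CLAIM (what is proved, stated in full; the proofs are below) =====
def Claim_equal_is_generic_strava_title_py : Prop := ∀ (title : Option String), Dom_is_generic_strava_title_py title → Spec_is_generic_strava_title_py title (is_generic_strava_title_py title)

-- ===== LEMMAS AND PROOFS =====

-- splitting p ++ ' ' :: a at the first space recovers p and a when p is space-free
theorem takeWhile_sep (p a : List Char) (h : ∀ c ∈ p, (c != ' ') = true) :
    (p ++ ' ' :: a).takeWhile (fun c => c != ' ') = p ∧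
    (p ++ ' ' :: a).dropWhile (fun c => c != ' ') = ' ' :: a := by
  induction p with
  | nil => simp
  | cons c p ih =>
    have hc : (c != ' ') = true := h c (List.mem_cons_self ..)
    have := ih (fun d hd => h d (List.mem_cons_of_mem _ hd))
    simp [hc, this.1, this.2]

theorem dropWhile_head_false {p : Char → Bool} {l rest : List Char} {c : Char}
    (h : l.dropWhile p = c :: rest) : p c = false := by
  induction l with
  | nil => simp at h
  | cons x xs ih =>
    by_cases hx : p x
    · rw [List.dropWhile_cons_of_pos hx] at h; exact ih h
    · rw [List.dropWhile_cons_of_neg hx] at h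
      cases h; simpa using hx

theorem a_prefixes_space_free :
    ∀ p ∈ aTimePrefixes, ∀ c ∈ p, (c != ' ') = true := by
  have h : aTimePrefixes.all (fun p => p.all (fun c => c != ' ')) = true := by rfl
  simp only [List.all_eq_true] at h; exact h

theorem b_time_eq : bTimePrefixes = aTimePrefixes := by rfl
theorem b_act_eq : bActivityTypes = aActivityTypes := by rfl
theorem b_exact_eq : bGenericExact = aGenericExact := by rfl

theorem if_or_comm (m g : Bool) : (if m then true else g) = (if g then true else m) := by
  cases m <;> cases g <;> rfl

-- the nested loop over concatenations equals the partition-based test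
theorem loop_eq_partition (t : List Char) :
    (aTimePrefixes.any (fun p => aActivityTypes.any (fun a => t == p ++ ' ' :: a))) =
    (match t.dropWhile (fun c => c != ' ') with
     | ' ' :: rest =>
        PySem.Set.contains bTimePrefixes (t.takeWhile (fun c => c != ' ')) &&
        PySem.Set.contains bActivityTypes rest
     | _ => false) := by
  rw [Bool.eq_iff_iff]
  constructor
  · intro h
    simp only [List.any_eq_true, beq_iff_eq] at h
    obtain ⟨p, hp, a, ha, ht⟩ := h
    subst ht
    obtain ⟨h1, h2⟩ := takeWhile_sep p a (a_prefixes_space_free p hp)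
    rw [h1, h2]
    simp only [b_time_eq, b_act_eq, PySem.Set.contains]
    simp [hp, ha]
  · intro h
    rcases hd : t.dropWhile (fun c => c != ' ') with _ | ⟨c, rest⟩ <;> rw [hd] at h
    · simp at h
    · have hc : c = ' ' := by simpa using dropWhile_head_false hd
      subst hc
      simp only [b_time_eq, b_act_eq, PySem.Set.contains, Bool.and_eq_true,
        List.contains_iff_mem] at h
      obtain ⟨hpre, hrest⟩ := h
      have hsplit : t.takeWhile (fun c => c != ' ') ++ ' ' :: rest = t := by
        rw [← hd]; exact List.takeWhile_append_dropWhile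
      simp only [List.any_eq_true, beq_iff_eq]
      exact ⟨_, hpre, rest, hrest, hsplit.symm⟩

-- ===== VERDICT (by name: the statement is the Claim_ definition above) =====
theorem is_generic_strava_title_py_spec : Claim_equal_is_generic_strava_title_py := by
  intro title _
  unfold Spec_is_generic_strava_title_py is_generic_strava_title_py is_generic_strava_title_py_alt
  match title with
  | none => rfl
  | some s =>
    by_cases hs : s = ""
    · simp [hs]
    · simp only [if_neg hs]
      rw [loop_eq_partition, b_exact_eq]
      exact if_or_comm _ _
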